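-- pv_equiv track=rewrite | github.com/LorenzoChavez/CodingBat-Exercises | List-2/sum67.py | sum67
-- ===== SOURCE A (Python) =====
-- def sum67(nums):
--   new_nums = nums[:]
--   if new_nums == []:
--     return 0
--
--   while 6 in new_nums:
--     start_6 = new_nums.index(6)
--     end_7 = new_nums.index(7,start_6)
--     del(new_nums[start_6:end_7+1])
--
--   return sum(new_nums)
-- ===== SOURCE B (Python) =====
-- def sum67(nums):
--     total = 0
--     skipping = False
--     for x in nums:
--         if skipping:
--             if x == 7:
--                 skipping = False
--         elif x == 6:
--             skipping = True
--         else: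
--             total += x
--     return total
-- ===== Notes on version B (the rewrite author's own statement) =====
-- stated objective: alternative
-- what changed: A repeatedly rescans and deletes 6..7 sections from a copy of the list (repeated index/in/del passes); B is a single left-to-right pass keeping a running total and a skip flag toggled at 6 and at the matching 7.
import Mathlib
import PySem

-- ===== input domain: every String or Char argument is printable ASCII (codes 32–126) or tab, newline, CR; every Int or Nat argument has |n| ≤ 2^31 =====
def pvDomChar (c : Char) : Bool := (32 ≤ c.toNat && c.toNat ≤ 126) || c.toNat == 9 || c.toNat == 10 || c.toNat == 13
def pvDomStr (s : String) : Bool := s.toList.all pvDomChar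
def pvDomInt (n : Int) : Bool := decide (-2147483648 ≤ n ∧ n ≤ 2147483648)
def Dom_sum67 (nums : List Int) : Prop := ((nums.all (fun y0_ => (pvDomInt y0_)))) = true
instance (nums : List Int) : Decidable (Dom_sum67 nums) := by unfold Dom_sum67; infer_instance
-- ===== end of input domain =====

-- B replaces A's repeated rescan-and-delete of 6..7 sections by one pass with a skip flag (alternative, single-pass structure); return-value equivalence only (A copies its argument, neither mutates the caller's list).

-- ===== PORT A =====
-- the while-loop body: each iteration deletes at least one element, so l.length decreases
def sum67Loop (l : List Int) : Int :=
  if h6 : (6 : Int) ∈ l then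
    match hi : PySem.List.index? l 6 with
    | none => 0      -- unreachable: 6 ∈ l
    | some start_6 =>
      -- new_nums.index(7, start_6): first 7 at position ≥ start_6 (exact: search the drop, add the offset)
      match h7 : PySem.List.index? (l.drop start_6) 7 with
      | none => 0    -- Python raises ValueError here; excluded by Pre_sum67
      | some k =>
        let end_7 := start_6 + k
        -- del new_nums[start_6:end_7+1]  (exact here: 0 ≤ start_6 ≤ end_7 < l.length)
        sum67Loop (l.take start_6 ++ l.drop (end_7 + 1))
  else l.sum
termination_by l.length
decreasing_by
  simp only [List.length_append, List.length_take, List.length_drop]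
  have h1 : PySem.List.index? l 6 = some start_6 := hi
  obtain ⟨hlt, -, -⟩ := PySem.List.getElem_of_index?_eq_some h1
  have h2 : PySem.List.index? (l.drop start_6) 7 = some k := h7
  obtain ⟨hk, -, -⟩ := PySem.List.getElem_of_index?_eq_some h2
  simp only [List.length_drop] at hk
  omega

def sum67 (nums : List Int) : Int :=
  let new_nums := nums     -- nums[:]
  if new_nums = [] then 0
  else sum67Loop new_nums

-- ===== PORT B =====
def sum67Step (st : Int × Bool) (x : Int) : Int × Bool :=
  if st.2 then (if x = 7 then (st.1, false) else st)
  else if x = 6 then (st.1, true)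
  else (st.1 + x, st.2)

def sum67_alt (nums : List Int) : Int :=
  (nums.foldl sum67Step (0, false)).1

-- ===== PRECONDITION & SPEC =====
-- Pre_ excludes exactly the inputs where A raises ValueError: lists containing a 6
-- with no 7 at the same or a later position.
def Pre_sum67 (nums : List Int) : Prop :=
  ∀ i < nums.length, nums.getD i 0 = 6 → ∃ j < nums.length, i ≤ j ∧ nums.getD j 0 = 7
instance (nums : List Int) : Decidable (Pre_sum67 nums) := by unfold Pre_sum67; infer_instance
def pvWitness_sum67 : List Int := [1, 6, 2, 7, 3]

def Spec_sum67 (nums : List Int) (out : Int) : Prop := out = sum67_alt nums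
instance (nums : List Int) (out : Int) : Decidable (Spec_sum67 nums out) := by unfold Spec_sum67; infer_instance

-- ===== CLAIM (what is proved, stated in full; the proofs are below) =====
def Claim_equal_sum67 : Prop := ∀ (nums : List Int), Dom_sum67 nums → Pre_sum67 nums → Spec_sum67 nums (sum67 nums)

-- ===== LEMMAS AND PROOFS =====

-- structural version of Pre_: every 6 is followed by a later 7
def sum67Ok : List Int → Bool
  | [] => true
  | x :: xs => (if x = 6 then xs.contains 7 else true) && sum67Ok xs

lemma ok_of_pre : ∀ l : List Int, Pre_sum67 l → sum67Ok l = true := by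
  intro l
  induction l with
  | nil => intro _; rfl
  | cons x xs ih =>
    intro hp
    have hxs : Pre_sum67 xs := by
      intro i hi h6
      obtain ⟨j, hj, hij, h7⟩ := hp (i + 1) (by simpa using Nat.succ_lt_succ hi) (by simpa using h6)
      rcases j with _ | j
      · omega
      · refine ⟨j, ?_, ?_, ?_⟩
        · simpa using Nat.lt_of_succ_lt_succ hj
        · omega
        · simpa using h7
    simp only [sum67Ok, Bool.and_eq_true, ih hxs, and_true]
    split_ifs with hx6
    · obtain ⟨j, hj, -, h7⟩ := hp 0 (by simp) (by simpa using hx6)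
      rcases j with _ | j
      · simp [hx6] at h7
      · have hj' : j < xs.length := by simpa using Nat.lt_of_succ_lt_succ hj
        have h7' : xs.getD j 0 = 7 := by simpa using h7
        have : (7 : Int) ∈ xs := by
          rw [List.getD_eq_getElem xs 0 hj'] at h7'
          exact h7' ▸ List.getElem_mem hj'
        simpa using this
    · rfl

lemma ok_suffix : ∀ a b : List Int, sum67Ok (a ++ b) = true → sum67Ok b = true := by
  intro a
  induction a with
  | nil => intro b h; simpa using h
  | cons x xs ih =>
    intro b h
    simp only [List.cons_append, sum67Ok, Bool.and_eq_true] at h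
    exact ih b h.2

lemma ok_prepend : ∀ u v : List Int, (6 : Int) ∉ u → sum67Ok v = true → sum67Ok (u ++ v) = true := by
  intro u v hu hv
  induction u with
  | nil => simpa using hv
  | cons x xs ih =>
    have hx : x ≠ 6 := fun h => hu (h ▸ List.mem_cons_self)
    simp only [List.cons_append, sum67Ok, Bool.and_eq_true, if_neg hx, true_and]
    exact ih (fun h => hu (List.mem_cons_of_mem _ h))

-- a fold with the flag down over a 6-free list just adds the sum
lemma fold_no6 : ∀ (u : List Int) (t : Int), (6 : Int) ∉ u →
    u.foldl sum67Step (t, false) = (t + u.sum, false) := by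
  intro u
  induction u with
  | nil => intro t _; simp
  | cons x xs ih =>
    intro t hu
    have hx : x ≠ 6 := fun h => hu (h ▸ List.mem_cons_self)
    simp only [List.foldl_cons, sum67Step, if_neg hx, Bool.false_eq_true, if_false]
    rw [ih (t + x) (fun h => hu (List.mem_cons_of_mem _ h))]
    simp [List.sum_cons]; ring_nf

-- a fold with the flag up over a 7-free list changes nothing
lemma fold_no7 : ∀ (m : List Int) (t : Int), (7 : Int) ∉ m →
    m.foldl sum67Step (t, true) = (t, true) := by
  intro m
  induction m with
  | nil => intro t _; simp
  | cons x xs ih =>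
    intro t hm
    have hx : x ≠ 7 := fun h => hm (h ▸ List.mem_cons_self)
    simp only [List.foldl_cons, sum67Step, if_neg hx, if_true]
    exact ih t (fun h => hm (List.mem_cons_of_mem _ h))

lemma alt_section (u m v : List Int) (hu : (6 : Int) ∉ u) (hm : (7 : Int) ∉ m) :
    sum67_alt (u ++ 6 :: (m ++ 7 :: v)) = sum67_alt (u ++ v) := by
  unfold sum67_alt
  rw [List.foldl_append, List.foldl_append, fold_no6 u 0 hu, List.foldl_cons]
  have h6step : sum67Step (0 + u.sum, false) 6 = (0 + u.sum, true) := by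
    simp [sum67Step]
  rw [h6step, List.foldl_append, fold_no7 m _ hm, List.foldl_cons]
  have h7step : sum67Step (0 + u.sum, true) 7 = (0 + u.sum, false) := by
    simp [sum67Step]
  rw [h7step]

lemma sum67Loop_eq_alt : ∀ (n : Nat) (l : List Int), l.length ≤ n → sum67Ok l = true →
    sum67Loop l = sum67_alt l := by
  intro n
  induction n with
  | zero =>
    intro l hl _
    have : l = [] := List.length_eq_zero_iff.mp (Nat.le_zero.mp hl)
    subst this
    rw [sum67Loop]
    simp [sum67_alt]
  | succ n ih =>
    intro l hl hok
    by_cases h6 : (6 : Int) ∈ l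
    · -- decompose l = u ++ 6 :: m ++ 7 :: v
      obtain ⟨i, hi⟩ := Option.isSome_iff_exists.mp ((PySem.List.index?_isSome_iff l 6).mpr h6)
      obtain ⟨u, m', hlu, hulen, hu6⟩ := (PySem.List.index?_eq_some_iff l 6 i).mp hi
      have hok' : sum67Ok ((6 : Int) :: m') = true := by
        rw [hlu] at hok; exact ok_suffix u _ hok
      have h7m' : (7 : Int) ∈ m' := by
        simp only [sum67Ok, Bool.and_eq_true] at hok'
        simpa using hok'.1
      obtain ⟨k', hk'⟩ := Option.isSome_iff_exists.mp ((PySem.List.index?_isSome_iff m' 7).mpr h7m')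
      obtain ⟨m, v, hm'v, hmlen, hm7⟩ := (PySem.List.index?_eq_some_iff m' 7 k').mp hk'
      subst hm'v
      have hdrop : l.drop i = (6 : Int) :: (m ++ 7 :: v) := by
        rw [hlu, ← hulen, List.drop_left]
      have h7idx : PySem.List.index? (l.drop i) 7 = some (k' + 1) := by
        rw [hdrop, PySem.List.index?_cons_of_ne (m ++ 7 :: v) (by norm_num), hk']; rfl
      have htake : l.take i = u := by rw [hlu, ← hulen, List.take_left]
      have hdrop2 : l.drop (i + (k' + 1) + 1) = v := by
        have hl2 : l = (u ++ 6 :: m ++ [7]) ++ v := by simp [hlu]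
        rw [hl2, show i + (k' + 1) + 1 = (u ++ 6 :: m ++ [7]).length by
          simp only [List.length_append, List.length_cons, List.length_nil, hulen, hmlen], List.drop_left]
      have hokuv : sum67Ok (u ++ v) = true := by
        have hv : sum67Ok v = true := by
          rw [hlu] at hok
          exact ok_suffix (u ++ 6 :: m ++ [7]) v (by simpa using hok)
        exact ok_prepend u v hu6 hv
      have hlen : (u ++ v).length ≤ n := by
        have : l.length = u.length + (m.length + v.length + 2) := by
          rw [hlu]; simp [List.length_append]; omega
        simp only [List.length_append]; omega
      -- unfold one iteration of A's loop
      rw [sum67Loop]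
      rw [dif_pos h6]
      split
      next heq => rw [hi] at heq; cases heq
      next i0 heq =>
        rw [hi] at heq
        injection heq with heq
        subst heq
        split
        next heq7 => rw [h7idx] at heq7; cases heq7
        next k heq7 =>
          rw [h7idx] at heq7
          injection heq7 with heq7
          subst heq7
          rw [htake]
          show sum67Loop (u ++ List.drop (i + (k' + 1) + 1) l) = sum67_alt l
          rw [hdrop2, ih (u ++ v) hlen hokuv, hlu]
          exact (alt_section u m v hu6 hm7).symm
    · rw [sum67Loop]
      rw [dif_neg h6]
      unfold sum67_alt
      rw [fold_no6 l 0 h6]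
      simp

-- ===== VERDICT (by name: the statement is the Claim_ definition above) =====
theorem sum67_spec : Claim_equal_sum67 := by
  intro nums _ hpre
  unfold Spec_sum67 sum67
  by_cases hn : nums = []
  · subst hn; simp [sum67_alt]
  · simp only [hn, if_false]
    exact sum67Loop_eq_alt nums.length nums le_rfl (ok_of_pre nums hpre)
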